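-- pv_equiv track=rewrite | github.com/thonisklim/Ruslan_Usachov | MyProjects/RedactorBot/tg_red_bot_main.py | nice_formatting
-- ===== SOURCE A (Python) =====
-- def nice_formatting(some_string, bad_list):
--     if len(some_string) > 0:
--         some_string = remove_wrong(some_string, bad_list)
--         last_symbol = some_string[-1]
--         if last_symbol == '?' or last_symbol == '!' or last_symbol == '.':
--             some_string = some_string.capitalize()
--             # here we delete extra spaces
--             while some_string.find(f" {last_symbol}") != -1:
--                 some_string = remove_wrong(some_string, [f" {last_symbol}"], last_symbol)
--     return some_string
--
-- def remove_wrong(some_string, list_of_wrong_symbols, replace_with=None):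
--     if replace_with is None:
--         replace_with = ''
--     for symbol in list_of_wrong_symbols:
--         some_string = some_string.replace(symbol, replace_with)
--     return some_string
-- ===== SOURCE B (Python) =====
-- def nice_formatting(some_string, bad_list):
--     if not some_string:
--         return some_string
--     absent = set()  # bad substrings known not to occur in the current string
--     for bad in bad_list:
--         if bad in absent:
--             continue
--         cleaned = some_string.replace(bad, '')
--         if cleaned == some_string:
--             absent.add(bad)
--         else:
--             some_string = cleaned
--             absent = set()  # a removal can create new occurrences of other bads
--     last = some_string[-1]
--     if last != '?' and last != '!' and last != '.':
--         return some_string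
--     s = some_string.capitalize()
--     out = []
--     pending = 0
--     for ch in s:
--         if ch == ' ':
--             pending += 1
--         else:
--             if ch != last and pending:
--                 out.append(' ' * pending)
--             pending = 0
--             out.append(ch)
--     if pending:
--         out.append(' ' * pending)
--     return ''.join(out)
-- ===== Notes on version B (the rewrite author's own statement) =====
-- stated objective: faster
-- what changed: B skips bad-list replaces whose substring is already known absent from the current string (resetting that knowledge whenever the string changes), and replaces A's repeated full-string replace(" X","X") fixpoint loop with one linear pass that drops the pending space run before the final punctuation char.
import Mathlib
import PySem

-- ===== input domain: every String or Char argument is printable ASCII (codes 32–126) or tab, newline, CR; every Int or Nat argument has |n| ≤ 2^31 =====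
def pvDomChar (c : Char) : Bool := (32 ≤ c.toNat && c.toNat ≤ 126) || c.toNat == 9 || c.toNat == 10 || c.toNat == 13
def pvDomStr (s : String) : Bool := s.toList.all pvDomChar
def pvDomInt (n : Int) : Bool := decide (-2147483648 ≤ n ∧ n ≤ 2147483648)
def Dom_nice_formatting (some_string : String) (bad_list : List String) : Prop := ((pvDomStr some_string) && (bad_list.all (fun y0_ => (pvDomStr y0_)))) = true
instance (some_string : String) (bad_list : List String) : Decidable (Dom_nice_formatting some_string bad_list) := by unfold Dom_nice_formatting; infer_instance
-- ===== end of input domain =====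

-- B replaces A's repeated full-string replace(" X","X") passes (quadratic on long space
-- runs before the final punctuation char) with one linear pass that drops the pending
-- space run before that char; same return value on Pre_.


-- s.capitalize() (exact on the ASCII domain: first char uppercased, rest lowercased);
-- shared by both ports, since both Pythons call str.capitalize().
def pyCapitalize (s : String) : String :=
  String.ofList (match s.toList with
    | [] => []
    | c :: t => PySem.Chars.upper [c] ++ PySem.Chars.lower t)

-- ===== PORT A =====
def remove_wrong (some_string : String) (list_of_wrong_symbols : List String)
    (replace_with : Option String) : String :=
  let r := replace_with.getD ""
  list_of_wrong_symbols.foldl (fun acc sym => PySem.Str.replace acc sym r) some_string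

-- A's `while some_string.find(f" {last_symbol}") != -1:` loop; each productive iteration
-- strictly shrinks the string (proved below), so length+1 fuel never runs out.
def niceLoopA (ls : Char) (fuel : Nat) (s : String) : String :=
  match fuel with
  | 0 => s
  | fuel + 1 =>
    if PySem.Str.find s (String.ofList [' ', ls]) ≠ -1 then
      niceLoopA ls fuel (remove_wrong s [String.ofList [' ', ls]] (some (String.ofList [ls])))
    else s

def nice_formatting (some_string : String) (bad_list : List String) : String :=
  if 0 < PySem.Str.len some_string then
    let s1 := remove_wrong some_string bad_list none
    match PySem.Str.pyGet? s1 (-1) with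
    | none => s1   -- Python raises IndexError here; Pre_ excludes exactly these inputs
    | some ls =>
      if ls = '?' ∨ ls = '!' ∨ ls = '.' then
        let s2 := pyCapitalize s1
        niceLoopA ls ((PySem.Str.len s2).toNat + 1) s2
      else s1
  else some_string

-- ===== PORT B =====
-- B's bad-substring removal: replaces whose substring is known absent from the current
-- string are skipped (an exact no-op elision; the set is reset whenever the string changes).
def cleanB : List String → String → PySem.Set String → String
  | [], s, _ => s
  | b :: rest, s, absent =>
    if PySem.Set.contains absent b then cleanB rest s absent
    else
      let c := PySem.Str.replace s b ""
      if c == s then cleanB rest s (PySem.Set.add absent b)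
      else cleanB rest c PySem.Set.empty

-- B's single pass: `pending` counts the current run of spaces; the run is flushed before
-- any non-space char except the punctuation char c, where it is dropped.
def collapseSpaces (c : Char) : List Char → Nat → List Char
  | [], pending => List.replicate pending ' '
  | x :: t, pending =>
    if x = ' ' then collapseSpaces c t (pending + 1)
    else (if x = c then [] else List.replicate pending ' ') ++ x :: collapseSpaces c t 0

def nice_formatting_alt (some_string : String) (bad_list : List String) : String :=
  if some_string.toList.isEmpty then some_string
  else
    let cleaned := cleanB bad_list some_string PySem.Set.empty
    match PySem.Str.pyGet? cleaned (-1) with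
    | none => cleaned   -- B's Python raises IndexError here too; Pre_ excludes these inputs
    | some c =>
      if ¬(c = '?' ∨ c = '!' ∨ c = '.') then cleaned
      else String.ofList (collapseSpaces c (pyCapitalize cleaned).toList 0)

-- ===== PRECONDITION & SPEC =====
-- Pre_ excludes exactly the inputs where both Pythons raise IndexError at some_string[-1]:
-- a nonempty some_string whose bad-substring removal leaves the empty string.
def Pre_nice_formatting (some_string : String) (bad_list : List String) : Prop :=
  some_string.toList = [] ∨
    (bad_list.foldl (fun acc b => PySem.Str.replace acc b "") some_string).toList ≠ []
instance (some_string : String) (bad_list : List String) : Decidable (Pre_nice_formatting some_string bad_list) := by unfold Pre_nice_formatting; infer_instance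

def pvWitness_nice_formatting : String × List String := ("a  b x.", ["x"])

def Spec_nice_formatting (some_string : String) (bad_list : List String) (out : String) : Prop := out = nice_formatting_alt some_string bad_list
instance (some_string : String) (bad_list : List String) (out : String) : Decidable (Spec_nice_formatting some_string bad_list out) := by unfold Spec_nice_formatting; infer_instance

-- ===== CLAIM (what is proved, stated in full; the proofs are below) =====
def Claim_equal_nice_formatting : Prop := ∀ (some_string : String) (bad_list : List String), Dom_nice_formatting some_string bad_list → Pre_nice_formatting some_string bad_list → Spec_nice_formatting some_string bad_list (nice_formatting some_string bad_list)

-- ===== LEMMAS AND PROOFS =====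

-- Skipping a replace whose pattern does not occur is a no-op, so cleanB computes A's fold.
theorem cleanB_eq_foldl (bl : List String) (s : String) (absent : PySem.Set String)
    (h : ∀ b ∈ absent, PySem.Str.replace s b "" = s) :
    cleanB bl s absent = bl.foldl (fun acc b => PySem.Str.replace acc b "") s := by
  induction bl generalizing s absent with
  | nil => rfl
  | cons b rest ih =>
    rw [cleanB, List.foldl_cons]
    by_cases hc : PySem.Set.contains absent b = true
    · rw [if_pos hc]
      have hb : b ∈ absent := by simpa [PySem.Set.contains] using hc
      rw [h b hb]
      exact ih s absent h
    · rw [if_neg hc]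
      by_cases he : (PySem.Str.replace s b "" == s) = true
      · rw [if_pos he]
        have heq : PySem.Str.replace s b "" = s := by simpa using he
        rw [heq]
        refine ih s (PySem.Set.add absent b) ?_
        intro x hx
        rcases (by simpa [PySem.Set.mem_add] using hx : x ∈ absent ∨ x = b) with hx' | rfl
        · exact h x hx'
        · exact heq
      · rw [if_neg he]
        exact ih _ PySem.Set.empty (by simp [PySem.Set.empty])

-- One pass of Python's `s.replace(" c", "c")`, as a structural scan (proof-side only).
def repOnce (c : Char) : List Char → List Char
  | [] => []
  | [x] => [x]
  | x :: y :: t => if x = ' ' ∧ y = c then c :: repOnce c t else x :: repOnce c (y :: t)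

theorem replace_go_eq_repOnce (c : Char) (fuel : Nat) (l acc : List Char)
    (h : l.length ≤ fuel) :
    PySem.Chars.replace.go [' ', c] [c] fuel l acc = acc.reverse ++ repOnce c l := by
  induction fuel generalizing l acc with
  | zero =>
    have hl : l = [] := List.eq_nil_of_length_eq_zero (Nat.le_zero.mp h)
    subst hl
    simp [PySem.Chars.replace.go, repOnce]
  | succ fuel ih =>
    match l with
    | [] => simp [PySem.Chars.replace.go, repOnce]
    | x :: t =>
      rw [PySem.Chars.replace.go]
      by_cases hp : [' ', c].isPrefixOf (x :: t) = true
      · have hpre : [' ', c] <+: x :: t := List.isPrefixOf_iff_prefix.mp hp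
        obtain ⟨r, hr⟩ := hpre
        simp only [List.cons_append, List.nil_append, List.cons.injEq] at hr
        obtain ⟨hx, hrest⟩ := hr
        subst hx; subst hrest
        simp only [hp, if_true]
        have hlen : r.length ≤ fuel := by
          simp at h; omega
        simp only [List.length_cons, List.length_nil, List.drop_succ_cons, List.drop_zero, List.reverse_cons, List.reverse_nil]
        rw [ih r _ hlen]
        simp [repOnce]
      · rw [if_neg hp]
        have hlen : t.length ≤ fuel := by simp at h; omega
        rw [ih t _ hlen]
        match t with
        | [] => simp [repOnce]
        | y :: t' =>
          have hcond : ¬ (x = ' ' ∧ y = c) := by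
            intro ⟨h1, h2⟩; subst h1; subst h2
            simp [List.isPrefixOf] at hp
          simp [repOnce, hcond]

theorem replace_eq_repOnce (c : Char) (l : List Char) :
    PySem.Chars.replace l [' ', c] [c] = repOnce c l := by
  rw [PySem.Chars.replace]
  simp only [List.isEmpty_cons, Bool.false_eq_true, if_false]
  simpa using replace_go_eq_repOnce c l.length l [] (le_refl _)

theorem length_repOnce_le (c : Char) (l : List Char) : (repOnce c l).length ≤ l.length := by
  induction l using repOnce.induct c with
  | case1 => simp [repOnce]
  | case2 x => simp [repOnce]
  | case3 x y t hc ih => simp only [repOnce, hc, and_self, if_true, List.length_cons]; omega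
  | case4 x y t hc ih =>
    rw [repOnce, if_neg hc]
    simp only [List.length_cons] at ih ⊢
    omega

theorem length_repOnce_lt (c : Char) (l : List Char) (h : [' ', c] <:+: l) :
    (repOnce c l).length < l.length := by
  induction l using repOnce.induct c with
  | case1 => simp at h
  | case2 x =>
    have := h.length_le; simp at this
  | case3 x y t hc ih =>
    have := length_repOnce_le c t
    rw [repOnce, if_pos hc]
    simp only [List.length_cons]
    omega
  | case4 x y t hc ih =>
    have h2 : [' ', c] <:+: y :: t := by
      rcases (List.infix_cons_iff).mp h with hpre | hinf
      · exfalso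
        obtain ⟨r, hr⟩ := hpre
        simp only [List.cons_append, List.nil_append, List.cons.injEq] at hr
        exact hc ⟨hr.1.symm, hr.2.1.symm⟩
      · exact hinf
    have := ih h2
    rw [repOnce, if_neg hc]
    simp only [List.length_cons] at this ⊢
    omega

theorem collapseSpaces_repOnce (c : Char) (hc : c ≠ ' ') (l : List Char) :
    ∀ k, collapseSpaces c (repOnce c l) k = collapseSpaces c l k := by
  induction l using repOnce.induct c with
  | case1 => intro k; rfl
  | case2 x => intro k; rfl
  | case3 x y t hxy ih =>
    intro k
    rw [repOnce, if_pos hxy]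
    obtain ⟨rfl, rfl⟩ := hxy
    simp only [collapseSpaces]
    simp [hc, ih 0]
  | case4 x y t hxy ih =>
    intro k
    rw [repOnce, if_neg hxy]
    by_cases hx : x = ' '
    · simp only [collapseSpaces, if_pos hx]
      exact ih (k + 1)
    · simp only [collapseSpaces, if_neg hx]
      rw [ih 0]
      rfl

theorem collapseSpaces_of_not_infix (c : Char) (l : List Char) (k : Nat)
    (h : ¬ [' ', c] <:+: (List.replicate k ' ' ++ l)) :
    collapseSpaces c l k = List.replicate k ' ' ++ l := by
  induction l generalizing k with
  | nil => simp [collapseSpaces]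
  | cons x t ih =>
    by_cases hx : x = ' '
    · subst hx
      rw [collapseSpaces, if_pos rfl]
      have h' : ¬ [' ', c] <:+: (List.replicate (k + 1) ' ' ++ t) := by
        rw [List.replicate_succ']
        simpa using h
      rw [ih (k + 1) h', List.replicate_succ']
      simp
    · have hxc : ¬ (x = c ∧ 0 < k) := by
        rintro ⟨rfl, hk⟩
        apply h
        have heq : List.replicate k ' ' ++ x :: t
            = List.replicate (k - 1) ' ' ++ (' ' :: x :: t) := by
          conv_lhs => rw [show k = (k - 1) + 1 by omega, List.replicate_succ']
          simp
        rw [heq]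
        exact (show [' ', x] <+: ' ' :: x :: t from ⟨t, rfl⟩).isInfix.trans
          (List.suffix_append _ _).isInfix
      have ht : ¬ [' ', c] <:+: t := fun hinf => h (hinf.trans ((List.suffix_cons x t).trans (List.suffix_append _ _)).isInfix)
      rw [collapseSpaces, if_neg hx, ih 0 (by simpa using ht)]
      by_cases hxc2 : x = c
      · have hk : k = 0 := by
          by_contra hk0
          exact hxc ⟨hxc2, by omega⟩
        subst hk
        simp [hxc2]
      · simp [hxc2]

theorem niceLoopA_eq_collapse (c : Char) (hc : c ≠ ' ') (fuel : Nat) (s : String)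
    (h : s.toList.length < fuel) :
    niceLoopA c fuel s = String.ofList (collapseSpaces c s.toList 0) := by
  induction fuel generalizing s with
  | zero => omega
  | succ fuel ih =>
    rw [niceLoopA]
    by_cases hf : PySem.Str.find s (String.ofList [' ', c]) ≠ -1
    · rw [if_pos hf]
      have hinf : [' ', c] <:+: s.toList := by
        have := (PySem.Str.find_ne_neg_one_iff s (String.ofList [' ', c])).mp hf
        simpa using this
      have hrw : remove_wrong s [String.ofList [' ', c]] (some (String.ofList [c]))
          = PySem.Str.replace s (String.ofList [' ', c]) (String.ofList [c]) := by
        simp [remove_wrong]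
      have htl : (remove_wrong s [String.ofList [' ', c]] (some (String.ofList [c]))).toList
          = repOnce c s.toList := by
        rw [hrw, PySem.Str.toList_replace]
        simp [replace_eq_repOnce]
      have hlen : (remove_wrong s [String.ofList [' ', c]] (some (String.ofList [c]))).toList.length < fuel := by
        rw [htl]
        have := length_repOnce_lt c s.toList hinf
        omega
      rw [ih _ hlen, htl, collapseSpaces_repOnce c hc s.toList 0]
    · rw [if_neg hf]
      have hninf : ¬ [' ', c] <:+: s.toList := by
        intro hinf
        exact hf ((PySem.Str.find_ne_neg_one_iff s (String.ofList [' ', c])).mpr (by simpa using hinf))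
      have := collapseSpaces_of_not_infix c s.toList 0 (by simpa using hninf)
      rw [this]
      simp

theorem main_thm (s : String) (bl : List String) (hpre : Pre_nice_formatting s bl) :
    nice_formatting s bl = nice_formatting_alt s bl := by
  by_cases hs : s.toList = []
  · rw [nice_formatting, nice_formatting_alt, if_neg (by simp [PySem.Str.len_eq, hs]),
      if_pos (by simp [hs])]
  · have hne : (bl.foldl (fun acc b => PySem.Str.replace acc b "") s).toList ≠ [] := by
      rcases hpre with hnil | hne
      · exact absurd hnil hs
      · exact hne
    rw [nice_formatting, nice_formatting_alt,
      if_pos (by simp only [PySem.Str.len_eq]; exact_mod_cast List.length_pos_iff.mpr hs),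
      if_neg (by simpa using hs)]
    rw [cleanB_eq_foldl bl s PySem.Set.empty (by simp [PySem.Set.empty])]
    have hclean : remove_wrong s bl none = bl.foldl (fun acc b => PySem.Str.replace acc b "") s := by
      simp [remove_wrong]
    rw [hclean]
    set cleaned := bl.foldl (fun acc b => PySem.Str.replace acc b "") s with hcl
    have hget : PySem.Str.pyGet? cleaned (-1) = some (cleaned.toList.getLast hne) := by
      rw [PySem.Str.pyGet?_eq]
      simp only [PySem.Chars.pyGet?_eq_listPyGet?, PySem.List.pyGet?_neg_one]
      exact List.getLast?_eq_some_getLast hne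
    simp only [hget]
    by_cases hp : cleaned.toList.getLast hne = '?' ∨ cleaned.toList.getLast hne = '!' ∨ cleaned.toList.getLast hne = '.'
    · rw [if_pos hp, if_neg (not_not_intro hp)]
      have hc : cleaned.toList.getLast hne ≠ ' ' := by
        rcases hp with h | h | h <;> rw [h] <;> decide
      exact niceLoopA_eq_collapse _ hc _ _ (by simp [PySem.Str.len_eq])
    · rw [if_neg hp, if_pos hp]

-- ===== VERDICT (by name: the statement is the Claim_ definition above) =====
theorem nice_formatting_spec : Claim_equal_nice_formatting := by
  intro some_string bad_list _hdom hpre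
  exact main_thm some_string bad_list hpre
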